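-- pv_equiv track=rewrite | github.com/treenoder/ALGLB | LB2/B_02/main.py | solution
-- ===== SOURCE A (Python) =====
-- def solution(w: int, h: int, n: int) -> int:
--     """
--     Обчислює мінімальний розмір сторони квадратної дошки, на яку Стасик зможе розмістити всі свої дипломи.
--
--     Параметри:
--     w: Ширина диплому.
--     h: Висота диплому.
--     n: Кількість дипломів.
--
--     Складність:
--     O(log(max(w, h) * n) * log(n))
--
--     Повертає:
--     Мінімальний розмір сторони квадратної дошки.
--     """
--
--     # Для перевірки, чи можна розмістити n дипломів на дошці розміру size x size
--     def can_fit(size):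
--         return (size // w) * (size // h) >= n
--
--     # Початкові значення для бінарного пошуку
--     left, right = 0, max(w, h) * n
--     while left < right:
--         mid = left + (right - left) // 2
--         # Якщо на дошці розміру mid x mid можна розмістити n дипломів, звужуємо праву межу
--         if can_fit(mid):
--             right = mid
--         else:
--             # Інакше звужуємо ліву межу
--             left = mid + 1
--     # Повертаємо мінімальний розмір сторони квадратної дошки
--     return left
-- ===== SOURCE B (Python) =====
-- def solution(w: int, h: int, n: int) -> int:
--     """Min side of a square board fitting n w-by-h diplomas in a grid.
--
--     Enumerates the split into columns/rows directly: for each count c with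
--     (c-1)^2 <= n, a board with c diplomas along one axis needs ceil(n/c)
--     along the other; trying c both as column count and as row count covers
--     every optimal split, so the answer is the minimum of max(c*w, ceil(n/c)*h)
--     and max(ceil(n/c)*w, c*h) over those c.
--     """
--     if n <= 0:
--         return 0
--     best = None
--     c = 1
--     while (c - 1) * (c - 1) <= n:
--         q = -(-n // c)  # ceil(n / c)
--         for cand in (max(c * w, q * h), max(q * w, c * h)):
--             if best is None or cand < best:
--                 best = cand
--         c += 1
--     return best
-- ===== Notes on version B (the rewrite author's own statement) =====
-- stated objective: alternative
-- what changed: Replaces the binary search over board sizes by a direct enumeration of the column/row split: for each count c with (c-1)^2 <= n it evaluates the closed-form candidates max(c*w, ceil(n/c)*h) and max(ceil(n/c)*w, c*h) and returns their minimum.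
-- outside the precondition, e.g. on solution(-2, 3, 2): A returns 6, B returns 3; on solution(-2, -3, 5): A returns 0, B returns -6
import Mathlib
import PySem

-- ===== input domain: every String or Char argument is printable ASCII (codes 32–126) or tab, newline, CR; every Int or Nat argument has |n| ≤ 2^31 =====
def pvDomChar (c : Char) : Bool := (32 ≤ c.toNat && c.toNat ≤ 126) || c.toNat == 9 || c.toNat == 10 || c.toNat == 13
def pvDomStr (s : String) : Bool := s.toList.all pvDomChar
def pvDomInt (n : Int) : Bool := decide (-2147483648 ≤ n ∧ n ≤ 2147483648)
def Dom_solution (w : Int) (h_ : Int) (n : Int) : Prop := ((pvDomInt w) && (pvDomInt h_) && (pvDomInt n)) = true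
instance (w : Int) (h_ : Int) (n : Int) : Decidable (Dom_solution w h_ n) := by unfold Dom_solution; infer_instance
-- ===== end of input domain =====

-- B replaces A's binary search over board sizes by a direct enumeration of the
-- column/row split with a per-split closed form (objective: alternative algorithm).

-- ===== PORT A =====
-- inner helper can_fit(size): (size // w) * (size // h) >= n
def canFit (w : Int) (h_ : Int) (n : Int) (size : Int) : Bool :=
  decide (n ≤ PySem.Int.floordiv size w * PySem.Int.floordiv size h_)

-- the while-loop of A: left, right narrowing binary search
-- (fuel is only a structural-termination bound: the interval shrinks each step,
--  so fuel = right - left + 1 iterations are always enough and 0 is never reached)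
def bsearch (w : Int) (h_ : Int) (n : Int) : Nat → Int → Int → Int
  | 0, left, _ => left
  | fuel + 1, left, right =>
    if left < right then
      let mid := left + PySem.Int.floordiv (right - left) 2
      if canFit w h_ n mid then bsearch w h_ n fuel left mid
      else bsearch w h_ n fuel (mid + 1) right
    else left

def solution (w : Int) (h_ : Int) (n : Int) : Int :=
  bsearch w h_ n ((max w h_ * n).toNat + 1) 0 (max w h_ * n)

-- ===== PORT B =====
-- 'if best is None or cand < best: best = cand'
def updmin (best : Option Int) (cand : Int) : Option Int :=
  match best with
  | none => some cand
  | some b => if cand < b then some cand else some b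

-- ceil(n / c) as B computes it: -(-n // c)
def ceilq (n : Int) (c : Int) : Int := -(PySem.Int.floordiv (-n) c)

-- the while-loop of B: c enumerates split counts while (c-1)^2 <= n
-- (fuel is only a structural-termination bound: the guard forces c ≤ n + 1,
--  so fuel = n + 2 iterations are always enough and 0 is never reached)
def bloop (w : Int) (h_ : Int) (n : Int) : Nat → Int → Option Int → Option Int
  | 0, _, best => best
  | fuel + 1, c, best =>
    if (c - 1) * (c - 1) ≤ n then
      let q := ceilq n c
      bloop w h_ n fuel (c + 1)
        (updmin (updmin best (max (c * w) (q * h_))) (max (q * w) (c * h_)))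
    else best

def solution_alt (w : Int) (h_ : Int) (n : Int) : Int :=
  if n ≤ 0 then 0
  else (bloop w h_ n (n.toNat + 2) 1 none).getD 0   -- best is never None here: c = 1 always enters the loop

-- ===== PRECONDITION & SPEC =====
-- Pre_ excludes nonpositive diploma dimensions (w ≤ 0 or h ≤ 0) with n ≥ 1 — outside the
-- problem's natural domain — where A either raises ZeroDivisionError or returns an accidental
-- value of its binary search over a predicate that is no longer monotone.
def Pre_solution (w : Int) (h_ : Int) (n : Int) : Prop := (1 ≤ w ∧ 1 ≤ h_) ∨ n ≤ 0
instance (w : Int) (h_ : Int) (n : Int) : Decidable (Pre_solution w h_ n) := by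
  unfold Pre_solution; infer_instance
def pvWitness_solution : Int × Int × Int := (2, 3, 5)

def Spec_solution (w : Int) (h_ : Int) (n : Int) (out : Int) : Prop := out = solution_alt w h_ n
instance (w : Int) (h_ : Int) (n : Int) (out : Int) : Decidable (Spec_solution w h_ n out) := by
  unfold Spec_solution; infer_instance

-- ===== CLAIM (what is proved, stated in full; the proofs are below) =====
def Claim_equal_solution : Prop := ∀ (w : Int) (h_ : Int) (n : Int), Dom_solution w h_ n → Pre_solution w h_ n → Spec_solution w h_ n (solution w h_ n)

-- ===== LEMMAS AND PROOFS =====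

-- x^2 >= x for integers, packaged for the loop bound
theorem loop_bound {c n : Int} (h : (c - 1) * (c - 1) ≤ n) : c ≤ n + 1 := by
  rcases Int.lt_or_le c 2 with hc | hc
  · have h0 : (0:Int) ≤ (c - 1) * (c - 1) := mul_self_nonneg _
    omega
  · have h1 : c - 1 ≤ (c - 1) * (c - 1) := le_mul_of_one_le_left (by omega) (by omega)
    omega

theorem fd_mul_le {a b : Int} (hb : 0 < b) : PySem.Int.floordiv a b * b ≤ a :=
  (PySem.Int.le_floordiv_iff_mul_le hb).mp le_rfl

theorem fd_nonneg {a b : Int} (hb : 0 < b) (ha : 0 ≤ a) : 0 ≤ PySem.Int.floordiv a b :=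
  (PySem.Int.le_floordiv_iff_mul_le hb).mpr (by simpa using ha)

theorem ceilq_spec (n c : Int) (hc : 0 < c) :
    (ceilq n c - 1) * c < n ∧ n ≤ ceilq n c * c :=
  (PySem.Int.neg_floordiv_neg_eq_iff_of_pos hc).mp rfl

theorem ceilq_le {n c b : Int} (hc : 0 < c) (h : n ≤ b * c) : ceilq n c ≤ b := by
  have h1 := (ceilq_spec n c hc).1
  nlinarith

theorem ceilq_pos {n c : Int} (hc : 0 < c) (hn : 1 ≤ n) : 1 ≤ ceilq n c := by
  have h2 := (ceilq_spec n c hc).2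
  nlinarith

-- if a*b >= n and there is room for a columns of width w and b rows of height h, s fits
theorem fits_of {w h_ n a b s : Int} (hw : 0 < w) (hh : 0 < h_)
    (ha : 0 ≤ a) (hb : 0 ≤ b) (hab : n ≤ a * b) (h1 : a * w ≤ s) (h2 : b * h_ ≤ s) :
    n ≤ PySem.Int.floordiv s w * PySem.Int.floordiv s h_ := by
  have hA : a ≤ PySem.Int.floordiv s w := (PySem.Int.le_floordiv_iff_mul_le hw).mpr h1
  have hB : b ≤ PySem.Int.floordiv s h_ := (PySem.Int.le_floordiv_iff_mul_le hh).mpr h2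
  calc n ≤ a * b := hab
    _ ≤ PySem.Int.floordiv s w * PySem.Int.floordiv s h_ :=
      mul_le_mul hA hB hb (le_trans ha hA)

theorem fits_mono {w h_ n : Int} (hw : 0 < w) (hh : 0 < h_) :
    ∀ s t : Int, 0 ≤ s → s ≤ t →
      n ≤ PySem.Int.floordiv s w * PySem.Int.floordiv s h_ →
      n ≤ PySem.Int.floordiv t w * PySem.Int.floordiv t h_ := by
  intro s t hs hst hP
  have h1 : PySem.Int.floordiv s w ≤ PySem.Int.floordiv t w :=
    (PySem.Int.le_floordiv_iff_mul_le hw).mpr (le_trans (fd_mul_le hw) hst)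
  have h2 : PySem.Int.floordiv s h_ ≤ PySem.Int.floordiv t h_ :=
    (PySem.Int.le_floordiv_iff_mul_le hh).mpr (le_trans (fd_mul_le hh) hst)
  calc n ≤ PySem.Int.floordiv s w * PySem.Int.floordiv s h_ := hP
    _ ≤ _ := mul_le_mul h1 h2 (fd_nonneg hh hs) (le_trans (fd_nonneg hw hs) h1)

-- exact characterisation of A's binary search (for a predicate monotone on [0,∞))
theorem bsearch_spec (w h_ n : Int)
    (mono : ∀ s t : Int, 0 ≤ s → s ≤ t →
      n ≤ PySem.Int.floordiv s w * PySem.Int.floordiv s h_ →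
      n ≤ PySem.Int.floordiv t w * PySem.Int.floordiv t h_) :
    ∀ (fuel : Nat) (left right : Int), (right - left).toNat < fuel → 0 ≤ left → left ≤ right →
      n ≤ PySem.Int.floordiv right w * PySem.Int.floordiv right h_ →
      left ≤ bsearch w h_ n fuel left right ∧ bsearch w h_ n fuel left right ≤ right ∧
      n ≤ PySem.Int.floordiv (bsearch w h_ n fuel left right) w *
          PySem.Int.floordiv (bsearch w h_ n fuel left right) h_ ∧
      ∀ s, left ≤ s → s < bsearch w h_ n fuel left right →
        ¬ n ≤ PySem.Int.floordiv s w * PySem.Int.floordiv s h_ := by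
  intro fuel
  induction fuel with
  | zero => intro left right hfu _ _ _; omega
  | succ fuel ih =>
    intro left right hfu h0 hlr hPr
    simp only [bsearch]
    by_cases hlt : left < right
    · simp only [hlt, if_true]
      have hd : (0:Int) < 2 := by omega
      have hmid : left ≤ left + PySem.Int.floordiv (right - left) 2 ∧
          left + PySem.Int.floordiv (right - left) 2 < right := by
        rw [PySem.Int.floordiv_eq_ediv_of_pos hd]; omega
      set mid := left + PySem.Int.floordiv (right - left) 2 with hmiddef
      by_cases hcf : canFit w h_ n mid
      · have hPmid : n ≤ PySem.Int.floordiv mid w * PySem.Int.floordiv mid h_ :=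
          of_decide_eq_true hcf
        simp only [hcf, if_true]
        obtain ⟨ha, hb, hc, hd'⟩ := ih left mid (by omega) h0 (by omega) hPmid
        exact ⟨ha, by omega, hc, hd'⟩
      · have hPmid : ¬ n ≤ PySem.Int.floordiv mid w * PySem.Int.floordiv mid h_ := by
          intro hP; exact hcf (decide_eq_true hP)
        simp only [hcf, Bool.false_eq_true, if_false]
        obtain ⟨ha, hb, hc, hd'⟩ := ih (mid + 1) right (by omega) (by omega) (by omega) hPr
        refine ⟨by omega, hb, hc, ?_⟩
        intro s hs hsr hP
        rcases Int.lt_or_le mid s with hsm | hsm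
        · exact hd' s (by omega) hsr hP
        · exact hPmid (mono s mid (by omega) hsm hP)
    · simp only [hlt, if_false]
      have : left = right := by omega
      refine ⟨le_rfl, by omega, ?_, ?_⟩
      · rw [this]; exact hPr
      · intro s hs hsr; omega

theorem updmin_some (best : Option Int) (x : Int) :
    ∃ y, updmin best x = some y ∧ y ≤ x ∧ ∀ b, best = some b → y ≤ b := by
  cases best with
  | none => exact ⟨x, rfl, le_rfl, by intro b hb; cases hb⟩
  | some b =>
    by_cases hlt : x < b
    · exact ⟨x, by simp [updmin, hlt], le_rfl, by intro b' hb'; cases hb'; omega⟩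
    · exact ⟨b, by simp [updmin, hlt], by omega, by intro b' hb'; cases hb'; omega⟩

theorem updmin_cases {best : Option Int} {x r : Int} (h : updmin best x = some r) :
    r = x ∨ best = some r := by
  cases best with
  | none => exact Or.inl (Option.some.inj h).symm
  | some b =>
    by_cases hlt : x < b
    · rw [show updmin (some b) x = some x from by simp [updmin, hlt]] at h
      exact Or.inl (Option.some.inj h).symm
    · rw [show updmin (some b) x = some b from by simp [updmin, hlt]] at h
      exact Or.inr (by rw [Option.some.inj h])

-- once started with a value, the loop returns a value no larger
theorem bloop_some (w h_ n : Int) : ∀ (fuel : Nat) (c b : Int), (n + 2 - c).toNat < fuel →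
    ∃ r, bloop w h_ n fuel c (some b) = some r ∧ r ≤ b := by
  intro fuel
  induction fuel with
  | zero => intro c b hfu; omega
  | succ fuel ih =>
    intro c b hfu
    simp only [bloop]
    by_cases hg : (c - 1) * (c - 1) ≤ n
    · have hcb := loop_bound hg
      simp only [hg, if_true]
      obtain ⟨y1, hy1, hy1x, hy1b⟩ := updmin_some (some b) (max (c * w) (ceilq n c * h_))
      obtain ⟨y2, hy2, hy2x, hy2b⟩ := updmin_some (some y1) (max (ceilq n c * w) (c * h_))
      obtain ⟨r, hr, hrb⟩ := ih (c + 1) y2 (by omega)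
      refine ⟨r, ?_, ?_⟩
      · dsimp only; rw [hy1, hy2]; exact hr
      · exact le_trans hrb (le_trans (hy2b y1 rfl) (hy1b b rfl))
    · simp only [hg, if_false]
      exact ⟨b, rfl, le_rfl⟩

-- every value the loop returns is a candidate (or was the incoming best)
theorem bloop_mem (w h_ n : Int) : ∀ (fuel : Nat) (c : Int) (best : Option Int) (r : Int),
    bloop w h_ n fuel c best = some r →
    best = some r ∨ ∃ j, c ≤ j ∧ (j - 1) * (j - 1) ≤ n ∧
      (r = max (j * w) (ceilq n j * h_) ∨ r = max (ceilq n j * w) (j * h_)) := by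
  intro fuel
  induction fuel with
  | zero => intro c best r hr; exact Or.inl hr
  | succ fuel ih =>
    intro c best r hr
    simp only [bloop] at hr
    by_cases hg : (c - 1) * (c - 1) ≤ n
    · simp only [hg, if_true] at hr
      rcases ih (c + 1) _ r hr with h | ⟨j, hj1, hj2, hj3⟩
      · rcases updmin_cases h with h2 | h2
        · exact Or.inr ⟨c, le_rfl, hg, Or.inr h2⟩
        · rcases updmin_cases h2 with h3 | h3
          · exact Or.inr ⟨c, le_rfl, hg, Or.inl h3⟩
          · exact Or.inl h3
      · exact Or.inr ⟨j, by omega, hj2, hj3⟩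
    · simp only [hg, if_false] at hr
      exact Or.inl hr

-- the loop's result is at most each candidate it visits
theorem bloop_min (w h_ n : Int) : ∀ (fuel : Nat) (c : Int) (best : Option Int) (j : Int),
    (n + 2 - c).toNat < fuel → 1 ≤ c → c ≤ j → (j - 1) * (j - 1) ≤ n →
    ∃ r, bloop w h_ n fuel c best = some r ∧
      r ≤ max (j * w) (ceilq n j * h_) ∧ r ≤ max (ceilq n j * w) (j * h_) := by
  intro fuel
  induction fuel with
  | zero => intro c best j hfu; omega
  | succ fuel ih =>
    intro c best j hfu hc hcj hj
    have hg : (c - 1) * (c - 1) ≤ n :=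
      le_trans (mul_le_mul (by omega) (by omega) (by omega) (by omega)) hj
    have hcb := loop_bound hg
    simp only [bloop, hg, if_true]
    rcases eq_or_lt_of_le hcj with hceq | hclt
    · subst hceq
      obtain ⟨y1, hy1, hy1x, _⟩ := updmin_some best (max (c * w) (ceilq n c * h_))
      obtain ⟨y2, hy2, hy2x, hy2b⟩ := updmin_some (some y1) (max (ceilq n c * w) (c * h_))
      obtain ⟨r, hr, hrb⟩ := bloop_some w h_ n fuel (c + 1) y2 (by omega)
      rw [hy1, hy2]
      exact ⟨r, hr, le_trans hrb (le_trans (hy2b y1 rfl) hy1x), le_trans hrb hy2x⟩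
    · obtain ⟨r, hr, h1, h2⟩ := ih (c + 1) _ j (by omega) (by omega) (by omega) hj
      exact ⟨r, hr, h1, h2⟩

-- if r fits n diplomas, some enumerated candidate is ≤ r
theorem coverage (w h_ n r : Int) (hw : 1 ≤ w) (hh : 1 ≤ h_) (hn : 1 ≤ n)
    (h0 : 0 ≤ r) (hfit : n ≤ PySem.Int.floordiv r w * PySem.Int.floordiv r h_) :
    ∃ j, 1 ≤ j ∧ (j - 1) * (j - 1) ≤ n ∧
      (max (j * w) (ceilq n j * h_) ≤ r ∨ max (ceilq n j * w) (j * h_) ≤ r) := by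
  set a := PySem.Int.floordiv r w with hadef
  set b := PySem.Int.floordiv r h_ with hbdef
  have haw : a * w ≤ r := fd_mul_le (by omega)
  have hbh : b * h_ ≤ r := fd_mul_le (by omega)
  have ha0 : 0 ≤ a := fd_nonneg (by omega) h0
  have hb0 : 0 ≤ b := fd_nonneg (by omega) h0
  have ha1 : 1 ≤ a := by nlinarith
  have hb1 : 1 ≤ b := by nlinarith
  set c0 : Int := min a n with hc0def
  have hc01 : 1 ≤ c0 := le_min ha1 hn
  have hc0a : c0 ≤ a := min_le_left _ _
  have hc0b : n ≤ c0 * b := by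
    rcases min_cases a n with ⟨h1, _⟩ | ⟨h1, _⟩
    · rw [hc0def, h1]; linarith [hfit]
    · rw [hc0def, h1]; nlinarith
  rcases Int.lt_or_le n ((c0 - 1) * (c0 - 1)) with hsq | hsq
  · set j : Int := ceilq n c0 with hjdef
    have hspec := ceilq_spec n c0 (by omega)
    have hj1 : 1 ≤ j := ceilq_pos (by omega) hn
    have hc02 : 2 ≤ c0 := by nlinarith
    have hjc : j - 1 < c0 - 1 := by nlinarith
    have hjsq : (j - 1) * (j - 1) ≤ n := by nlinarith
    refine ⟨j, hj1, hjsq, Or.inr ?_⟩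
    have hjb : j ≤ b := ceilq_le (by omega) (by linarith [mul_comm c0 b])
    have hqa : ceilq n j ≤ a := by
      refine ceilq_le (by omega) ?_
      calc n ≤ j * c0 := by linarith [hspec.2, mul_comm (ceilq n c0) c0]
        _ ≤ a * j := by nlinarith
    have h1 : ceilq n j * w ≤ r := le_trans (mul_le_mul_of_nonneg_right hqa (by omega)) haw
    have h2 : j * h_ ≤ r := le_trans (mul_le_mul_of_nonneg_right hjb (by omega)) hbh
    exact max_le h1 h2
  · refine ⟨c0, hc01, hsq, Or.inl ?_⟩
    have hq : ceilq n c0 ≤ b := ceilq_le (by omega) (by linarith [mul_comm c0 b])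
    have h1 : c0 * w ≤ r := le_trans (mul_le_mul_of_nonneg_right hc0a (by omega)) haw
    have h2 : ceilq n c0 * h_ ≤ r := le_trans (mul_le_mul_of_nonneg_right hq (by omega)) hbh
    exact max_le h1 h2

theorem solution_main : ∀ (w : Int) (h_ : Int) (n : Int), Pre_solution w h_ n → solution w h_ n = solution_alt w h_ n := by
  intro w h_ n hpre
  by_cases hn : n ≤ 0
  · have hB : solution_alt w h_ n = 0 := by simp [solution_alt, hn]
    rw [hB]
    unfold solution
    by_cases hR : 0 < max w h_ * n
    · -- here n < 0 and w, h_ < 0: the predicate holds for every s ≥ 0, so the search ends at 0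
      have hn' : n < 0 := by
        rcases Int.lt_or_le n 0 with h | h
        · exact h
        · exfalso
          have h0n : n = 0 := le_antisymm hn h
          subst h0n
          simp at hR
      have hM : max w h_ < 0 := by nlinarith [le_max_left w h_]
      have hw : w < 0 := lt_of_le_of_lt (le_max_left w h_) hM
      have hh : h_ < 0 := lt_of_le_of_lt (le_max_right w h_) hM
      have hall : ∀ s : Int, 0 ≤ s → n ≤ PySem.Int.floordiv s w * PySem.Int.floordiv s h_ := by
        intro s hs
        have e1 := PySem.Int.floordiv_mul_add_mod s w
        have m1 := PySem.Int.mod_neg_bounds (a := s) hw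
        have e2 := PySem.Int.floordiv_mul_add_mod s h_
        have m2 := PySem.Int.mod_neg_bounds (a := s) hh
        have f1 : PySem.Int.floordiv s w ≤ 0 := by nlinarith
        have f2 : PySem.Int.floordiv s h_ ≤ 0 := by nlinarith
        nlinarith
      obtain ⟨h1, h2, h3, h4⟩ := bsearch_spec w h_ n
        (fun s t hs hst _ => hall t (le_trans hs hst))
        ((max w h_ * n).toNat + 1) 0 (max w h_ * n) (by omega) le_rfl (by omega) (hall _ (by omega))
      by_contra hne
      exact h4 0 le_rfl (by omega) (hall 0 le_rfl)
    · simp only [bsearch, hR, if_false]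
  · obtain ⟨hw, hh⟩ : 1 ≤ w ∧ 1 ≤ h_ := hpre.resolve_right hn
    have hn1 : 1 ≤ n := by omega
    -- B returns some m, minimal over the candidates
    obtain ⟨m, hm, _, _⟩ := bloop_min w h_ n (n.toNat + 2) 1 none 1 (by omega) le_rfl le_rfl
      (by simpa using le_trans zero_le_one hn1)
    have hB : solution_alt w h_ n = m := by
      unfold solution_alt
      rw [if_neg hn, hm]
      rfl
    -- A returns the least fitting size r
    have hM : w ≤ max w h_ := le_max_left w h_
    have hR0 : 0 ≤ max w h_ * n := mul_nonneg (by omega) (by omega)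
    have hPright : n ≤ PySem.Int.floordiv (max w h_ * n) w * PySem.Int.floordiv (max w h_ * n) h_ := by
      refine fits_of (a := n) (b := n) (by omega) (by omega) (by omega) (by omega) (by nlinarith) ?_ ?_
      · calc n * w ≤ n * max w h_ := mul_le_mul_of_nonneg_left hM (by omega)
          _ = max w h_ * n := mul_comm _ _
      · calc n * h_ ≤ n * max w h_ := mul_le_mul_of_nonneg_left (le_max_right w h_) (by omega)
          _ = max w h_ * n := mul_comm _ _
    obtain ⟨hr0, hrR, hrP, hleast⟩ := bsearch_spec w h_ n (fits_mono (by omega) (by omega))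
      ((max w h_ * n).toNat + 1) 0 (max w h_ * n) (by omega) le_rfl hR0 hPright
    unfold solution
    rw [hB]
    set r := bsearch w h_ n ((max w h_ * n).toNat + 1) 0 (max w h_ * n) with hrdef
    -- m is a genuine candidate, hence fits and is positive
    have hmem := bloop_mem w h_ n (n.toNat + 2) 1 none m hm
    rcases hmem with h | ⟨j, hj1, hj2, hcand⟩
    · cases h
    have hq := ceilq_spec n j (by omega)
    have hq1 : 1 ≤ ceilq n j := ceilq_pos (by omega) hn1
    have hmP : n ≤ PySem.Int.floordiv m w * PySem.Int.floordiv m h_ := by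
      rcases hcand with h | h <;> rw [h]
      · exact fits_of (a := j) (b := ceilq n j) (by omega) (by omega) (by omega) (by omega)
          (by nlinarith [hq.2]) (le_max_left _ _) (le_max_right _ _)
      · exact fits_of (a := ceilq n j) (b := j) (by omega) (by omega) (by omega) (by omega)
          (by nlinarith [hq.2]) (le_max_left _ _) (le_max_right _ _)
    have hm0 : 0 ≤ m := by
      rcases hcand with h | h <;> rw [h]
      · exact le_trans (by nlinarith) (le_max_left (j * w) _)
      · exact le_trans (by nlinarith) (le_max_right _ (j * h_))
    have hrm : r ≤ m := by
      by_contra hcon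
      exact hleast m hm0 (by omega) hmP
    -- coverage: some candidate is ≤ r, and m is ≤ every candidate
    obtain ⟨j', hj'1, hj'2, hcase⟩ := coverage w h_ n r hw hh hn1 hr0 hrP
    obtain ⟨m', hm', hle1, hle2⟩ := bloop_min w h_ n (n.toNat + 2) 1 none j' (by omega) le_rfl hj'1 hj'2
    rw [hm] at hm'
    cases hm'
    rcases hcase with h | h
    · omega
    · omega


-- ===== VERDICT (by name: the statement is the Claim_ definition above) =====
theorem solution_spec : Claim_equal_solution := by
  intro w h_ n _ hpre
  unfold Spec_solution
  exact solution_main w h_ n hpre
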